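-- pv_equiv track=rewrite | github.com/aracelj/PythonProject | Veckouppgift 5/balance_list.py | balance_list__green
-- ===== SOURCE A (Python) =====
-- def balance_list__green(list1,list2):
--     lista1 = [str(item).replace(","," ").split() for item in list1]     #copying to another list name,converting to string, replacing,"," to space and removing it
--     lista2 = [str(item).replace(","," ").split() for item in list2]     #copying to another list name,converting to string, replacing,"," to space and removing it
--     counter1 = len(lista1)
--     counter2 = len(lista2)
--     counter_diff = abs(counter1 - counter2) // 2
--     if counter1 == 0 and counter2 == 0:                                 #checking if two lists are empty
--         return None
--     if counter1 > counter2:                                             #checks if list1 has more elements than list2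
--         for i in range(counter_diff):
--             lista2.append(lista1[-1])                                   #appending the end element of list1 to list2
--             lista1.pop()                                                #removing the last element of list1
--     elif counter1 < counter2:                                           #checks if list2 has more elements than list1
--         for i in range(counter_diff):
--             lista1.append(lista2[-1])                                   #appending the end element of list2 to list1
--             lista2.pop()                                                #removing the last element of list2
--
--     return len(lista1) == len(lista2)
-- ===== SOURCE B (Python) =====
-- def balance_list__green(list1, list2):
--     # O(1): balancing moves |len1-len2|//2 elements, so lengths end equal iff the difference is even
--     if not list1 and not list2:
--         return None
--     return abs(len(list1) - len(list2)) % 2 == 0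
-- ===== Notes on version B (the rewrite author's own statement) =====
-- stated objective: faster
-- what changed: Replaced the per-element string conversion and the element-moving loop by a closed-form length computation: None if both lists are empty, else whether |len(list1)-len(list2)| is even.
import Mathlib
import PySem

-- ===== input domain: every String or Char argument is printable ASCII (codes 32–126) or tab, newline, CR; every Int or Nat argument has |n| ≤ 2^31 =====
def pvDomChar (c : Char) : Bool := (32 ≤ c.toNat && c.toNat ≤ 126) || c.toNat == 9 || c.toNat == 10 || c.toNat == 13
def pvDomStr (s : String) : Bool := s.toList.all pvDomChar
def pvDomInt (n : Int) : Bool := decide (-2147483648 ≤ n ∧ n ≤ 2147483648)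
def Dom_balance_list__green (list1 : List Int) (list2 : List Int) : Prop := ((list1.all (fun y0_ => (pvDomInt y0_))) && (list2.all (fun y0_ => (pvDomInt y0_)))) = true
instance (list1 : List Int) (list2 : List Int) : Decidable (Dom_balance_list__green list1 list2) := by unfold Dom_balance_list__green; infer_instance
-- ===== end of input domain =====

-- B replaces A's per-element string conversion and element-moving loop by a closed-form length parity test (objective: faster; measured).
-- ===== PORT A =====
-- A-side loop bodies (the two for-loop iterations of A, as named steps)
def moveFromFst {α : Type} (p : List α × List α) : List α × List α :=
  match PySem.List.pyGet? p.1 (-1) with   -- lista1[-1]; none = IndexError (unreachable: the loop runs fewer times than p.1 is long)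
  | some x => (p.1.dropLast, p.2 ++ [x])  -- append to lista2, then lista1.pop()
  | none => p

def moveFromSnd {α : Type} (p : List α × List α) : List α × List α :=
  match PySem.List.pyGet? p.2 (-1) with
  | some x => (p.1 ++ [x], p.2.dropLast)
  | none => p

def balance_list__green (list1 : List Int) (list2 : List Int) : Option Bool :=
  let lista1 := list1.map (fun item => PySem.Str.split₀ (PySem.Str.replace (PySem.Int.toStr item) "," " "))
  let lista2 := list2.map (fun item => PySem.Str.split₀ (PySem.Str.replace (PySem.Int.toStr item) "," " "))
  let counter1 : Int := lista1.length
  let counter2 : Int := lista2.length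
  let counter_diff : Int := PySem.Int.floordiv |counter1 - counter2| 2
  if counter1 = 0 ∧ counter2 = 0 then
    none
  else
    let (a, b) :=
      if counter1 > counter2 then
        (PySem.List.pyRange 0 counter_diff 1).foldl
          (fun p _ => moveFromFst p)
          (lista1, lista2)
      else if counter1 < counter2 then
        (PySem.List.pyRange 0 counter_diff 1).foldl
          (fun p _ => moveFromSnd p)
          (lista1, lista2)
      else (lista1, lista2)
    some (decide (a.length = b.length))

-- ===== PORT B =====
def balance_list__green_alt (list1 : List Int) (list2 : List Int) : Option Bool :=
  if list1 = [] ∧ list2 = [] then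
    none
  else
    some (decide (PySem.Int.mod |(list1.length : Int) - (list2.length : Int)| 2 = 0))

-- ===== PRECONDITION & SPEC =====
def Spec_balance_list__green (list1 : List Int) (list2 : List Int) (out : Option Bool) : Prop := out = balance_list__green_alt list1 list2
instance (list1 : List Int) (list2 : List Int) (out : Option Bool) : Decidable (Spec_balance_list__green list1 list2 out) := by unfold Spec_balance_list__green; infer_instance

-- ===== CLAIM (what is proved, stated in full; the proofs are below) =====
def Claim_equal_balance_list__green : Prop := ∀ (list1 : List Int) (list2 : List Int), Dom_balance_list__green list1 list2 → Spec_balance_list__green list1 list2 (balance_list__green list1 list2)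

-- ===== LEMMAS AND PROOFS =====
-- length invariant of the element-moving loop: each step moves the last element of p.1 to p.2
theorem loop_len_move {α : Type} (L : List Int) :
    ∀ (a b : List α), L.length ≤ a.length →
      (L.foldl (fun p _ => moveFromFst p) (a, b)).1.length = a.length - L.length ∧
      (L.foldl (fun p _ => moveFromFst p) (a, b)).2.length = b.length + L.length := by
  induction L with
  | nil => intro a b _; simp
  | cons i L ih =>
    intro a b h
    have ha : a ≠ [] := by intro hn; subst hn; simp at h
    obtain ⟨x, hx⟩ := List.getLast?_isSome.mpr ha |> Option.isSome_iff_exists.mp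
    have hget : PySem.List.pyGet? a (-1) = some x := by
      rw [PySem.List.pyGet?_neg_one]; exact hx
    have hstep : moveFromFst (a, b) = (a.dropLast, b ++ [x]) := by
      simp [moveFromFst, hget]
    simp only [List.foldl_cons, hstep]
    have := ih a.dropLast (b ++ [x]) (by simp at h ⊢; omega)
    simpa using by
      constructor
      · rw [this.1]; simp at h ⊢; omega
      · rw [this.2]; simp; omega


-- mirrored invariant for the second branch (moves from p.2 to p.1)
theorem loop_len_move' {α : Type} (L : List Int) :
    ∀ (a b : List α), L.length ≤ b.length →
      (L.foldl (fun p _ => moveFromSnd p) (a, b)).1.length = a.length + L.length ∧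
      (L.foldl (fun p _ => moveFromSnd p) (a, b)).2.length = b.length - L.length := by
  induction L with
  | nil => intro a b _; simp
  | cons i L ih =>
    intro a b h
    have hb : b ≠ [] := by intro hn; subst hn; simp at h
    obtain ⟨x, hx⟩ := List.getLast?_isSome.mpr hb |> Option.isSome_iff_exists.mp
    have hget : PySem.List.pyGet? b (-1) = some x := by
      rw [PySem.List.pyGet?_neg_one]; exact hx
    have hstep : moveFromSnd (a, b) = (a ++ [x], b.dropLast) := by
      simp [moveFromSnd, hget]
    simp only [List.foldl_cons, hstep]
    have := ih (a ++ [x]) b.dropLast (by simp at h ⊢; omega)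
    simpa using by
      constructor
      · rw [this.1]; simp; omega
      · rw [this.2]; simp at h ⊢; omega

-- counter_diff is the floor half of the nonnegative difference, in Nat terms
theorem floordiv_abs_toNat (n1 n2 : Nat) :
    (PySem.Int.floordiv |(n1 : Int) - (n2 : Int)| 2).toNat = ((max n1 n2) - (min n1 n2)) / 2 ∧
    0 ≤ PySem.Int.floordiv |(n1 : Int) - (n2 : Int)| 2 := by
  rw [PySem.Int.floordiv_eq_ediv_of_pos (by norm_num)]
  rcases le_total n1 n2 with h | h
  · rw [abs_of_nonpos (by omega), max_eq_right h, min_eq_left h]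
    constructor
    · omega
    · exact Int.ediv_nonneg (by omega) (by norm_num)
  · rw [abs_of_nonneg (by omega), max_eq_left h, min_eq_right h]
    constructor
    · omega
    · exact Int.ediv_nonneg (by omega) (by norm_num)

-- ===== VERDICT (by name: the statement is the Claim_ definition above) =====
theorem balance_list__green_spec : Claim_equal_balance_list__green := by
  intro list1 list2 _
  unfold Spec_balance_list__green balance_list__green balance_list__green_alt
  simp only [List.length_map]
  by_cases h0 : list1 = [] ∧ list2 = []
  · obtain ⟨h1, h2⟩ := h0; subst h1; subst h2; simp
  · rw [if_neg h0, if_neg (by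
      intro ⟨ha, hb⟩
      exact h0 ⟨List.eq_nil_of_length_eq_zero (by exact_mod_cast ha),
                List.eq_nil_of_length_eq_zero (by exact_mod_cast hb)⟩)]
    obtain ⟨hd, hdnn⟩ := floordiv_abs_toNat list1.length list2.length
    have hmod := PySem.Int.mod_eq_emod_of_pos (a := |(list1.length : Int) - (list2.length : Int)|) (b := 2) (by norm_num)
    split_ifs with hgt hlt
    · -- list1 longer
      have hlen : (PySem.List.pyRange 0 (PySem.Int.floordiv |(list1.length : Int) - (list2.length : Int)| 2) 1).length
          = (PySem.Int.floordiv |(list1.length : Int) - (list2.length : Int)| 2).toNat := by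
        rw [PySem.List.length_pyRange_one]; omega
      have key := loop_len_move (α := List String)
        (PySem.List.pyRange 0 (PySem.Int.floordiv |(list1.length : Int) - (list2.length : Int)| 2) 1)
        (list1.map (fun item => PySem.Str.split₀ (PySem.Str.replace (PySem.Int.toStr item) "," " ")))
        (list2.map (fun item => PySem.Str.split₀ (PySem.Str.replace (PySem.Int.toStr item) "," " ")))
        (by simp only [hlen, List.length_map]; omega)
      simp only [List.length_map, hlen] at key
      rw [key.1, key.2]
      congr 1
      rw [decide_eq_decide, hmod, abs_of_nonneg (by omega : (0:Int) ≤ (list1.length : Int) - (list2.length : Int)),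
          PySem.Int.floordiv_eq_ediv_of_pos (by norm_num)]
      omega
    · -- list2 longer
      have hlen : (PySem.List.pyRange 0 (PySem.Int.floordiv |(list1.length : Int) - (list2.length : Int)| 2) 1).length
          = (PySem.Int.floordiv |(list1.length : Int) - (list2.length : Int)| 2).toNat := by
        rw [PySem.List.length_pyRange_one]; omega
      have key := loop_len_move' (α := List String)
        (PySem.List.pyRange 0 (PySem.Int.floordiv |(list1.length : Int) - (list2.length : Int)| 2) 1)
        (list1.map (fun item => PySem.Str.split₀ (PySem.Str.replace (PySem.Int.toStr item) "," " ")))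
        (list2.map (fun item => PySem.Str.split₀ (PySem.Str.replace (PySem.Int.toStr item) "," " ")))
        (by simp only [hlen, List.length_map]; omega)
      simp only [List.length_map, hlen] at key
      rw [key.1, key.2]
      congr 1
      rw [decide_eq_decide, hmod, abs_of_nonpos (by omega : (list1.length : Int) - (list2.length : Int) ≤ 0),
          PySem.Int.floordiv_eq_ediv_of_pos (by norm_num)]
      omega
    · -- equal lengths
      congr 1
      rw [decide_eq_decide, hmod]
      have heq : list1.length = list2.length := by
        exact_mod_cast (by omega : (list1.length : Int) = (list2.length : Int))
      simp [heq]
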